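-- pv_equiv track=rewrite | github.com/karu9/adventcalendar3 | src/day4/day4.py | validate2
-- ===== SOURCE A (Python) =====
-- def validate2(words):
--     for i in range(len(words)):
--      for j in range(i + 1, len(words)):
--          wordi = sorted(list(map(lambda x : x, words[i])))
--          wordj = sorted(list(map(lambda x : x, words[j])))
--          if wordi == wordj:
--              return False
--     return True
-- ===== SOURCE B (Python) =====
-- def validate2(words):
--     sigs = sorted(''.join(sorted(w)) for w in words)
--     for a, b in zip(sigs, sigs[1:]):
--         if a == b:
--             return False
--     return True
-- ===== Notes on version B (the rewrite author's own statement) =====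
-- stated objective: alternative
-- what changed: Replace A's nested pairwise loops that re-sort each word inside the inner loop with computing one canonical signature per word, sorting the signature list once, and a single adjacent-equality pass.
import Mathlib
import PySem

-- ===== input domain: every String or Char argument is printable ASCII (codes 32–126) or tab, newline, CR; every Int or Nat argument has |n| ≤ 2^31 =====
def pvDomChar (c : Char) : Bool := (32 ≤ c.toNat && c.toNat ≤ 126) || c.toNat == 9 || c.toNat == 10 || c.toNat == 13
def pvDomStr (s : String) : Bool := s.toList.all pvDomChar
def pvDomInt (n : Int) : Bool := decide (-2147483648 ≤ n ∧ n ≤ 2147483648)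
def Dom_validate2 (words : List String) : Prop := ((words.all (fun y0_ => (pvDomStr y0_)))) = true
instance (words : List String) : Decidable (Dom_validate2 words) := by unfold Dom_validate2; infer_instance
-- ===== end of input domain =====

-- B replaces A's nested pairwise re-sorting scan by signatures + one sort + one adjacent-equality pass (objective: alternative decomposition).

-- ===== PORT A =====
-- sorted(list(map(lambda x : x, words[i]))): the identity map is kept literally
def validate2_sortA (w : String) : List Char :=
  PySem.List.sorted (w.toList.map (fun x => x)) (fun x => x) false

-- inner loop 'for j in range(i+1, len(words))': returns true iff the early 'return False' fires;
-- indices drawn from List.range'/List.range are always < words.length, so getD "" is exact for words[i]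
def validate2_chkJ (words : List String) (i : Nat) : List Nat → Bool
  | [] => false
  | j :: rest =>
      let wordi := validate2_sortA (words.getD i "")
      let wordj := validate2_sortA (words.getD j "")
      if wordi == wordj then true else validate2_chkJ words i rest

-- outer loop 'for i in range(len(words))'
def validate2_loopI (words : List String) : List Nat → Bool
  | [] => true
  | i :: rest =>
      if validate2_chkJ words i (List.range' (i+1) (words.length - (i+1))) then false
      else validate2_loopI words rest

def validate2 (words : List String) : Bool :=
  validate2_loopI words (List.range words.length)

-- ===== PORT B =====
-- ''.join(sorted(w))
def validate2_sig (w : String) : String :=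
  String.ofList (PySem.List.sorted w.toList (fun x => x) false)

def validate2_alt (words : List String) : Bool :=
  let sigs := PySem.List.sorted (words.map validate2_sig) (fun x => x) false
  (sigs.zip sigs.tail).all (fun p => !(p.1 == p.2))

-- ===== PRECONDITION & SPEC =====
def Spec_validate2 (words : List String) (out : Bool) : Prop := out = validate2_alt words
instance (words : List String) (out : Bool) : Decidable (Spec_validate2 words out) := by unfold Spec_validate2; infer_instance

-- ===== CLAIM (what is proved, stated in full; the proofs are below) =====
def Claim_equal_validate2 : Prop := ∀ (words : List String), Dom_validate2 words → Spec_validate2 words (validate2 words)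

-- ===== LEMMAS AND PROOFS =====

theorem validate2_sortA_eq (w : String) : validate2_sortA w = (validate2_sig w).toList := by
  simp [validate2_sortA, validate2_sig, List.map_id']

theorem chkJ_cons (words : List String) (i j : Nat) (rest : List Nat) :
    validate2_chkJ words i (j :: rest) =
      if validate2_sig (words.getD i "") = validate2_sig (words.getD j "") then true
      else validate2_chkJ words i rest := by
  simp only [validate2_chkJ, validate2_sortA_eq]
  by_cases h : validate2_sig (words.getD i "") = validate2_sig (words.getD j "")
  · have h2 : (validate2_sig (words.getD i "")).toList = (validate2_sig (words.getD j "")).toList := by rw [h]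
    simp only [List.getD_eq_getElem?_getD] at h h2
    simp [h]
  · have h2 : ¬ (validate2_sig (words.getD i "")).toList = (validate2_sig (words.getD j "")).toList :=
      fun he => h (String.toList_inj.mp he)
    simp only [List.getD_eq_getElem?_getD] at h h2
    simp [h, h2]

-- inner loop = existence of a matching j in the index list
theorem chkJ_iff (words : List String) (i : Nat) (js : List Nat) :
    validate2_chkJ words i js = true ↔
      ∃ j ∈ js, validate2_sig (words.getD i "") = validate2_sig (words.getD j "") := by
  induction js with
  | nil => simp [validate2_chkJ]
  | cons j rest ih =>
      rw [chkJ_cons]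
      by_cases h : validate2_sig (words.getD i "") = validate2_sig (words.getD j "")
      all_goals simp only [List.getD_eq_getElem?_getD] at h ih ⊢
      · simp [h]
      · simp [h, ih]

-- outer loop = no i in the index list has a matching later j
theorem loopI_iff (words : List String) (is_ : List Nat) :
    validate2_loopI words is_ = true ↔
      ∀ i ∈ is_, validate2_chkJ words i (List.range' (i+1) (words.length - (i+1))) = false := by
  induction is_ with
  | nil => simp [validate2_loopI]
  | cons i rest ih =>
      simp only [validate2_loopI]
      by_cases h : validate2_chkJ words i (List.range' (i+1) (words.length - (i+1))) = true
      · rw [if_pos h]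
        exact iff_of_false (by simp)
          (fun hall => by rw [hall i (by simp)] at h; cases h)
      · rw [if_neg h, ih]
        constructor
        · intro hall k hk
          rcases List.mem_cons.mp hk with hk | hk
          · subst hk; simpa using h
          · exact hall k hk
        · intro hall k hk
          exact hall k (List.mem_cons_of_mem _ hk)

-- A = "the signature list has no duplicates"
theorem validate2_iff_nodup (words : List String) :
    validate2 words = true ↔ (words.map validate2_sig).Nodup := by
  rw [validate2, loopI_iff, List.Nodup, List.pairwise_iff_getElem]
  constructor
  · intro h p q hp hq hpq
    have hp' : p < words.length := by simpa using hp
    have hq' : q < words.length := by simpa using hq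
    have hc := h p (List.mem_range.mpr hp')
    intro he
    have ht : validate2_chkJ words p (List.range' (p+1) (words.length - (p+1))) = true := by
      refine (chkJ_iff _ _ _).mpr ⟨q, ?_, ?_⟩
      · exact List.mem_range'_1.mpr ⟨by omega, by omega⟩
      · rw [List.getD_eq_getElem _ _ hp', List.getD_eq_getElem _ _ hq']
        rw [List.getElem_map, List.getElem_map] at he
        exact he
    rw [ht] at hc
    cases hc
  · intro h i hi
    have hi' : i < words.length := List.mem_range.mp hi
    rcases hb : validate2_chkJ words i (List.range' (i+1) (words.length - (i+1))) with _ | _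
    · rfl
    · obtain ⟨j, hj, he⟩ := (chkJ_iff _ _ _).mp hb
      rw [List.mem_range'_1] at hj
      have hj' : j < words.length := by omega
      exact absurd (by
          rw [List.getElem_map, List.getElem_map]
          rw [List.getD_eq_getElem _ _ hi', List.getD_eq_getElem _ _ hj'] at he
          exact he)
        (h i j (by simpa using hi') (by simpa using hj') (by omega))

-- adjacent all-distinct over zip-with-tail = IsChain (≠)
theorem zip_tail_all_ne (l : List String) :
    ((l.zip l.tail).all (fun p => !(p.1 == p.2))) = true ↔ List.IsChain (fun a b => a ≠ b) l := by
  match l with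
  | [] => simp
  | [a] => simp
  | a :: b :: t =>
      have ih := zip_tail_all_ne (b :: t)
      rw [List.isChain_cons_cons]
      simp only [List.tail_cons, List.zip_cons_cons, List.all_cons, Bool.and_eq_true] at *
      constructor
      · rintro ⟨h1, h2⟩
        exact ⟨by simpa using h1, ih.mp h2⟩
      · rintro ⟨h1, h2⟩
        exact ⟨by simpa using h1, ih.mpr h2⟩

-- on a weakly sorted list, adjacent-distinct ⟺ no duplicates at all
theorem sorted_chain_ne_iff_nodup (l : List String) (hs : l.Pairwise (· ≤ ·)) :
    List.IsChain (fun a b => a ≠ b) l ↔ l.Nodup := by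
  constructor
  · intro hc
    have hle : List.IsChain (fun a b : String => a ≤ b) l := hs.isChain
    have hlt : List.IsChain (fun a b : String => a < b) l := by
      clear hs
      induction l with
      | nil => exact List.isChain_nil
      | cons a t ih =>
          match t with
          | [] => exact List.isChain_singleton a
          | b :: t' =>
              rw [List.isChain_cons_cons] at hc hle ⊢
              exact ⟨lt_of_le_of_ne hle.1 hc.1, ih hc.2 hle.2⟩
    exact (List.isChain_iff_pairwise.mp hlt).imp (fun h => ne_of_lt h)
  · intro hn
    exact hn.isChain

-- B = "the signature list has no duplicates"
theorem validate2_alt_iff_nodup (words : List String) :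
    validate2_alt words = true ↔ (words.map validate2_sig).Nodup := by
  rw [validate2_alt]
  rw [zip_tail_all_ne]
  rw [sorted_chain_ne_iff_nodup _
    (by simpa using PySem.List.sorted_pairwise (words.map validate2_sig) (fun x => x))]
  exact (PySem.List.sorted_perm (words.map validate2_sig) (fun x => x) false).nodup_iff

-- ===== VERDICT (by name: the statement is the Claim_ definition above) =====
theorem validate2_spec : Claim_equal_validate2 := by
  intro words _
  unfold Spec_validate2
  by_cases h : (words.map validate2_sig).Nodup
  · rw [(validate2_iff_nodup words).mpr h, ((validate2_alt_iff_nodup words).mpr h).symm]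
  · have ha := (not_congr (validate2_iff_nodup words)).mpr h
    have hb := (not_congr (validate2_alt_iff_nodup words)).mpr h
    rw [Bool.not_eq_true] at ha hb
    rw [ha, hb]
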